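-- pv_equiv track=rewrite | github.com/bigdegenenergy/open-cloud-ops | .github/scripts/combine_reviews.py | determine_decision
-- ===== SOURCE A (Python) =====
-- def determine_decision(gemini, codex):
--     decisions = []
--     if gemini:
--         decisions.append(gemini.get("decision", "COMMENT"))
--     if codex:
--         decisions.append(codex.get("decision", "COMMENT"))
--
--     if "REQUEST_CHANGES" in decisions:
--         return "REQUEST_CHANGES"
--     if all(d == "APPROVE" for d in decisions) and decisions:
--         return "APPROVE"
--     return "COMMENT"
-- ===== SOURCE B (Python) =====
-- def determine_decision(gemini, codex):
--     # Simpler: fold both reviews to a severity rank in one pass and map the max rank back.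
--     rank = {"APPROVE": 0, "REQUEST_CHANGES": 2}
--     m = max((rank.get(d.get("decision", "COMMENT"), 1) for d in (gemini, codex) if d),
--             default=1)
--     return ["APPROVE", "COMMENT", "REQUEST_CHANGES"][m]
-- ===== Notes on version B (the rewrite author's own statement) =====
-- stated objective: simpler
-- what changed: Replaces A's list-building plus two separate scans (membership test, all-APPROVE check with emptiness guard) by mapping each present review to a severity rank, taking the max with default 1, and indexing the result string.
import Mathlib
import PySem

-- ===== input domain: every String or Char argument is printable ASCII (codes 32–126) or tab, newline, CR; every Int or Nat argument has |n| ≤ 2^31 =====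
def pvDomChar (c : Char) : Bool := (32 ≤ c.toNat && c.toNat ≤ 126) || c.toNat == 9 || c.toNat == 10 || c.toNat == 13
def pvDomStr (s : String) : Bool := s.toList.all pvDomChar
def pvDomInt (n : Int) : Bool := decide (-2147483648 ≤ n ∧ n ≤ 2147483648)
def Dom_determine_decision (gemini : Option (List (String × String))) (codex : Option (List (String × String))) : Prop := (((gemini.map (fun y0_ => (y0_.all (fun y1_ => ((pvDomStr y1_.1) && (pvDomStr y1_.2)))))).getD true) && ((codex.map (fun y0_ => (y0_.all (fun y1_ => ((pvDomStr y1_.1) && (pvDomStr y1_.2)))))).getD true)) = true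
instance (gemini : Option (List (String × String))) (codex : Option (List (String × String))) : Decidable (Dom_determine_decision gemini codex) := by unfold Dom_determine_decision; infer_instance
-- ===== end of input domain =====

-- B resolves the combined review by folding both decisions to a severity rank (max) in one pass,
-- instead of A's two scans (membership + all) plus emptiness guard; objective: simpler.


-- ===== PORT A =====
-- Python truthiness of an optional dict: present and non-empty
def pvTruthy (o : Option (List (String × String))) : Bool :=
  match o with
  | some (_ :: _) => true
  | _ => false

def determine_decision (gemini : Option (List (String × String))) (codex : Option (List (String × String))) : String :=
  let decisions : List String := []
  let decisions := if pvTruthy gemini then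
      decisions ++ [(PySem.Dict.mk (gemini.getD [])).getD "decision" "COMMENT"] else decisions
  let decisions := if pvTruthy codex then
      decisions ++ [(PySem.Dict.mk (codex.getD [])).getD "decision" "COMMENT"] else decisions
  if decisions.contains "REQUEST_CHANGES" then "REQUEST_CHANGES"
  else if decisions.all (· == "APPROVE") && !decisions.isEmpty then "APPROVE"
  else "COMMENT"

-- ===== PORT B =====
def determine_decision_alt (gemini : Option (List (String × String))) (codex : Option (List (String × String))) : String :=
  let rank : PySem.Dict String Int := PySem.Dict.mk [("APPROVE", 0), ("REQUEST_CHANGES", 2)]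
  let ranks : List Int :=
    (([gemini, codex].filterMap id).filter (fun d => !d.isEmpty)).map
      (fun d => rank.getD ((PySem.Dict.mk d).getD "decision" "COMMENT") 1)
  let m : Int := match ranks with
    | [] => 1                      -- max(…, default=1)
    | x :: xs => xs.foldl max x
  -- m ∈ {0, 1, 2} always, so the Python index never raises
  (PySem.List.pyGet? ["APPROVE", "COMMENT", "REQUEST_CHANGES"] m).getD "COMMENT"

-- ===== PRECONDITION & SPEC =====
def Spec_determine_decision (gemini : Option (List (String × String))) (codex : Option (List (String × String))) (out : String) : Prop := out = determine_decision_alt gemini codex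
instance (gemini : Option (List (String × String))) (codex : Option (List (String × String))) (out : String) : Decidable (Spec_determine_decision gemini codex out) := by unfold Spec_determine_decision; infer_instance

-- ===== CLAIM (what is proved, stated in full; the proofs are below) =====
def Claim_equal_determine_decision : Prop := ∀ (gemini : Option (List (String × String))) (codex : Option (List (String × String))), Dom_determine_decision gemini codex → Spec_determine_decision gemini codex (determine_decision gemini codex)

-- ===== LEMMAS AND PROOFS =====

-- Agreement of the two reductions on a single decision string
theorem one_decision (d : String) :
    (if [d].contains "REQUEST_CHANGES" then "REQUEST_CHANGES"
     else if [d].all (· == "APPROVE") && !(List.isEmpty [d]) then "APPROVE"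
     else "COMMENT")
    = ((PySem.List.pyGet? ["APPROVE", "COMMENT", "REQUEST_CHANGES"]
        ((PySem.Dict.mk [("APPROVE", (0:Int)), ("REQUEST_CHANGES", 2)]).getD d 1)).getD "COMMENT") := by
  by_cases h1 : d = "REQUEST_CHANGES" <;> by_cases h2 : d = "APPROVE" <;>
    simp [h1, h2, PySem.Dict.getD, PySem.Dict.get?, PySem.List.pyGet?, PySem.List.pyIdx?, Ne.symm, beq_iff_eq]

theorem two_decisions (d e : String) :
    (if [d, e].contains "REQUEST_CHANGES" then "REQUEST_CHANGES"
     else if [d, e].all (· == "APPROVE") && !(List.isEmpty [d, e]) then "APPROVE"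
     else "COMMENT")
    = ((PySem.List.pyGet? ["APPROVE", "COMMENT", "REQUEST_CHANGES"]
        (max ((PySem.Dict.mk [("APPROVE", (0:Int)), ("REQUEST_CHANGES", 2)]).getD d 1)
             ((PySem.Dict.mk [("APPROVE", (0:Int)), ("REQUEST_CHANGES", 2)]).getD e 1))).getD "COMMENT") := by
  by_cases h1 : d = "REQUEST_CHANGES" <;> by_cases h2 : d = "APPROVE" <;>
  by_cases h3 : e = "REQUEST_CHANGES" <;> by_cases h4 : e = "APPROVE" <;>
    simp [h1, h2, h3, h4, PySem.Dict.getD, PySem.Dict.get?, PySem.List.pyGet?, PySem.List.pyIdx?, Ne.symm, beq_iff_eq]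

-- ===== VERDICT (by name: the statement is the Claim_ definition above) =====
theorem determine_decision_spec : Claim_equal_determine_decision := by
  intro gemini codex _
  unfold Spec_determine_decision determine_decision determine_decision_alt
  match gemini, codex with
  | none, none => rfl
  | none, some [] => rfl
  | some [], none => rfl
  | some [], some [] => rfl
  | none, some (p :: l) =>
      simpa [pvTruthy] using one_decision ((PySem.Dict.mk (p :: l)).getD "decision" "COMMENT")
  | some [], some (p :: l) =>
      simpa [pvTruthy] using one_decision ((PySem.Dict.mk (p :: l)).getD "decision" "COMMENT")
  | some (p :: l), none =>
      simpa [pvTruthy] using one_decision ((PySem.Dict.mk (p :: l)).getD "decision" "COMMENT")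
  | some (p :: l), some [] =>
      simpa [pvTruthy] using one_decision ((PySem.Dict.mk (p :: l)).getD "decision" "COMMENT")
  | some (p :: l), some (q :: k) =>
      simpa [pvTruthy] using two_decisions ((PySem.Dict.mk (p :: l)).getD "decision" "COMMENT")
        ((PySem.Dict.mk (q :: k)).getD "decision" "COMMENT")
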